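-- pv_equiv track=rewrite | github.com/osmukkaHY/Koulu | Viikko3/even.py | count_sublists
-- ===== SOURCE A (Python) =====
-- def count_sublists(numbers):
--     sublists = 0
--     sublist_count = 0
--
--     for n in numbers:
--         if not n % 2:
--             sublist_count += 1
--         else:
--             sublist_count = 0
--         sublists += sublist_count
--
--     return sublists
-- ===== SOURCE B (Python) =====
-- def count_sublists(numbers):
--     total = 0
--     run = 0
--     for n in numbers:
--         if not n % 2:
--             run += 1
--         else:
--             total += run * (run + 1) // 2
--             run = 0
--     return total + run * (run + 1) // 2
-- ===== Notes on version B (the rewrite author's own statement) =====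
-- stated objective: alternative
-- what changed: Replaces A's per-element accumulation of the running count with per-run closed-form triangle sums run*(run+1)//2 added only when a run of even numbers ends.
import Mathlib
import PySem

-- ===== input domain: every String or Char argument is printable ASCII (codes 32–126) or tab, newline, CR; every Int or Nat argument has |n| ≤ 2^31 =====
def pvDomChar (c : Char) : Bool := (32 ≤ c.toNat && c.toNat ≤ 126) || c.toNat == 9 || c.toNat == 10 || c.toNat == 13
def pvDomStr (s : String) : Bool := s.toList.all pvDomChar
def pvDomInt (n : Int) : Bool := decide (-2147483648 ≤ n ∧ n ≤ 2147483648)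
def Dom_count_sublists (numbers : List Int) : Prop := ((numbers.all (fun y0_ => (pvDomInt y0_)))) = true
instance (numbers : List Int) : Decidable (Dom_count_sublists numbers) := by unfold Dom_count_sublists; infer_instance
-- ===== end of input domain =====

-- B replaces A's per-element accumulation of the running even-count with per-run closed-form triangle sums run*(run+1)//2 (alternative decomposition, same cost).


-- ===== PORT A =====
def stepA (st : Int × Int) (n : Int) : Int × Int :=
  let c := if PySem.Int.mod n 2 = 0 then st.2 + 1 else 0
  (st.1 + c, c)

def count_sublists (numbers : List Int) : Int :=
  (numbers.foldl stepA (0, 0)).1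

-- ===== PORT B =====
def tri (r : Int) : Int := PySem.Int.floordiv (r * (r + 1)) 2

def stepB (st : Int × Int) (n : Int) : Int × Int :=
  if PySem.Int.mod n 2 = 0 then (st.1, st.2 + 1)
  else (st.1 + tri st.2, 0)

def count_sublists_alt (numbers : List Int) : Int :=
  let st := numbers.foldl stepB (0, 0)
  st.1 + tri st.2

-- ===== PRECONDITION & SPEC =====
def Spec_count_sublists (numbers : List Int) (out : Int) : Prop := out = count_sublists_alt numbers
instance (numbers : List Int) (out : Int) : Decidable (Spec_count_sublists numbers out) := by unfold Spec_count_sublists; infer_instance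

-- ===== CLAIM (what is proved, stated in full; the proofs are below) =====
def Claim_equal_count_sublists : Prop := ∀ (numbers : List Int), Dom_count_sublists numbers → Spec_count_sublists numbers (count_sublists numbers)

-- ===== LEMMAS AND PROOFS =====

theorem tri_succ (c : Int) : tri (c + 1) = tri c + (c + 1) := by
  obtain ⟨k, hk⟩ : (2:Int) ∣ c * (c + 1) := Int.even_mul_succ_self c |>.two_dvd
  unfold tri
  rw [PySem.Int.floordiv_eq_ediv_of_pos (by norm_num), PySem.Int.floordiv_eq_ediv_of_pos (by norm_num)]
  have h2 : (c + 1) * (c + 1 + 1) = 2 * (k + (c + 1)) := by linarith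
  rw [hk, h2, Int.mul_ediv_cancel_left _ (by norm_num), Int.mul_ediv_cancel_left _ (by norm_num)]

theorem key (l : List Int) : ∀ (t c : Int),
    (l.foldl stepA (t + tri c, c)).1
      = (l.foldl stepB (t, c)).1 + tri (l.foldl stepB (t, c)).2 := by
  induction l with
  | nil => intro t c; rfl
  | cons n l ih =>
    intro t c
    by_cases h : PySem.Int.mod n 2 = 0
    · have hA : stepA (t + tri c, c) n = (t + tri (c + 1), c + 1) := by
        simp only [stepA, if_pos h, tri_succ, Prod.mk.injEq]
        exact ⟨by ring, trivial⟩
      have hB : stepB (t, c) n = (t, c + 1) := by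
        simp only [stepB, if_pos h]
      simp only [List.foldl_cons, hA, hB, ih]
    · have hA : stepA (t + tri c, c) n = ((t + tri c) + tri 0, 0) := by
        simp only [stepA, if_neg h, Prod.mk.injEq]
        exact ⟨by simp [tri], trivial⟩
      have hB : stepB (t, c) n = (t + tri c, 0) := by
        simp only [stepB, if_neg h]
      simp only [List.foldl_cons, hA, hB, ih]

-- ===== VERDICT (by name: the statement is the Claim_ definition above) =====
theorem count_sublists_spec : Claim_equal_count_sublists := by
  intro numbers _
  unfold Spec_count_sublists count_sublists count_sublists_alt
  have := key numbers 0 0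
  simpa [tri] using this
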